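-- pv_equiv track=rewrite | github.com/ludwings0330/algo | programmers/solved/문자열압축.py | solution
-- ===== SOURCE A (Python) =====
-- def solution(s):
--
--     answer = origin_length = len(s)
--
--     # 1, 2, 3, 4, ... len(s)//2 로 쪼개기
--     for unit in range(1, len(s)//2+1):
--         current_length = origin_length
--
--         base = 0
--         count = 1
--
--         for step in range(unit, origin_length+unit, unit):
--             is_duplicate = True
--             for k in range(unit):
--                 if k+step >= origin_length:
--                     is_duplicate = False
--                     break
--
--                 if s[base + k] != s[k + step]:
--                     is_duplicate = False
--                     base = step
--                     break
--
--             if is_duplicate: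
--                 count += 1
--             else:
--                 digit = 0
--                 current_length = current_length - (count-1)*unit
--
--                 if count > 1:
--                     while count > 0:
--                         digit += 1
--                         count //= 10
--                         current_length += 1
--                 count = 1
--                 answer = min(answer, current_length)
--     return answer
-- ===== SOURCE B (Python) =====
-- def _group_len(key, count):
--     return len(key) + (len(str(count)) if count > 1 else 0)
--
--
-- def solution(s):
--     n = len(s)
--     answer = n
--     for unit in range(1, n // 2 + 1):
--         total = 0
--         prev = None
--         count = 0
--         for i in range(0, n, unit):
--             chunk = s[i:i + unit]
--             if chunk == prev:
--                 count += 1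
--             else:
--                 if prev is not None:
--                     total += _group_len(prev, count)
--                 prev = chunk
--                 count = 1
--         total += _group_len(prev, count)
--         answer = min(answer, total)
--     return answer
-- ===== Notes on version B (the rewrite author's own statement) =====
-- stated objective: faster
-- what changed: B splits the string into chunks with slicing and run-length-groups consecutive equal chunks, summing per-group lengths directly, instead of A's threaded current_length accumulator, base/step index arithmetic with a char-by-char inner comparison loop, and a manual digit-counting while loop.
import Mathlib
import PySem

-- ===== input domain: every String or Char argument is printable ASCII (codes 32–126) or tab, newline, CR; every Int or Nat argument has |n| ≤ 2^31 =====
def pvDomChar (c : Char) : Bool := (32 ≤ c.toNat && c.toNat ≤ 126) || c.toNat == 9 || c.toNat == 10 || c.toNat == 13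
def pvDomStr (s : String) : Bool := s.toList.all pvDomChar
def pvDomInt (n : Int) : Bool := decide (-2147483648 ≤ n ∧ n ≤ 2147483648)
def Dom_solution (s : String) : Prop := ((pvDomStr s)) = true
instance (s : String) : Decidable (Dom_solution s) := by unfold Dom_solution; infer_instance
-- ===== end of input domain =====

-- B re-implements A by slicing the string into chunks and run-length-grouping equal chunks,
-- replacing A's threaded current_length accumulator, base/step index arithmetic, char-by-char
-- inner comparison loop and manual digit loop; measurably faster by a constant factor.

-- ===== PORT A =====
-- the inner 'while count > 0' digit loop (the Python also keeps a write-only variable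
-- 'digit' that is never read; it is dropped as it cannot affect the result)
def pvDigitLoop (count cl : Int) : Int :=
  if 0 < count then pvDigitLoop (PySem.Int.floordiv count 10) (cl + 1) else cl
termination_by count.toNat
decreasing_by
  have h10 : PySem.Int.floordiv count 10 = count / 10 :=
    PySem.Int.floordiv_eq_ediv_of_pos (by norm_num)
  have _h1 := Int.mul_ediv_add_emod count 10
  have _h2 := Int.emod_nonneg count (by norm_num : (10:Int) ≠ 0)
  have _h3 := Int.emod_lt_of_pos count (by norm_num : (0:Int) < 10)
  have h4 : 0 ≤ count / 10 := Int.ediv_nonneg (by omega) (by norm_num)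
  omega

-- the inner 'for k in range(unit)' loop: returns (is_duplicate, base)
def pvCheck (cs : List Char) (n base step : Int) : List Int → Bool × Int
  | [] => (true, base)
  | k :: ks =>
    if n ≤ k + step then (false, base)
    else if PySem.List.pyGet? cs (base + k) ≠ PySem.List.pyGet? cs (k + step) then (false, step)
    else pvCheck cs n base step ks

-- one iteration of the 'for step in range(unit, origin_length+unit, unit)' loop;
-- state is (current_length, base, count, answer)
def pvAStep (cs : List Char) (n u : Int) (st : Int × Int × Int × Int) (step : Int) :
    Int × Int × Int × Int :=
  match st with
  | (cl, base, count, ans) =>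
    match pvCheck cs n base step (PySem.List.pyRange 0 u 1) with
    | (isDup, base') =>
      if isDup then (cl, base', count + 1, ans)
      else
        let cl1 := cl - (count - 1) * u
        let cl2 := if 1 < count then pvDigitLoop count cl1 else cl1
        (cl2, base', 1, min ans cl2)

def solution (s : String) : Int :=
  let cs := s.toList
  let n : Int := cs.length
  (PySem.List.pyRange 1 (PySem.Int.floordiv n 2 + 1) 1).foldl
    (fun ans u =>
      ((PySem.List.pyRange u (n + u) u).foldl (pvAStep cs n u) (n, 0, 1, ans)).2.2.2)
    n

-- ===== PORT B =====
-- _group_len(key, count)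
def pvGroupLen (key : List Char) (count : Int) : Int :=
  key.length + (if 1 < count then (PySem.Int.toChars count).length else 0)

-- one iteration of B's chunk loop; state is (prev, count, total)
def pvBStep (cs : List Char) (u : Int) (st : Option (List Char) × Int × Int) (i : Int) :
    Option (List Char) × Int × Int :=
  match st with
  | (prev, count, total) =>
    let c := PySem.List.slice cs (some i) (some (i + u))
    if some c = prev then (prev, count + 1, total)
    else
      match prev with
      | none => (some c, 1, total)
      | some p => (some c, 1, total + pvGroupLen p count)

-- the final 'total += _group_len(prev, count)' (prev = none never occurs: the chunk loop
-- runs at least once whenever the unit loop runs)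
def pvBFinish (st : Option (List Char) × Int × Int) : Int :=
  match st with
  | (none, _, total) => total
  | (some p, count, total) => total + pvGroupLen p count

def solution_alt (s : String) : Int :=
  let cs := s.toList
  let n : Int := cs.length
  (PySem.List.pyRange 1 (PySem.Int.floordiv n 2 + 1) 1).foldl
    (fun ans u =>
      min ans (pvBFinish ((PySem.List.pyRange 0 n u).foldl (pvBStep cs u) (none, 0, 0))))
    n

-- ===== PRECONDITION & SPEC =====
def Spec_solution (s : String) (out : Int) : Prop := out = solution_alt s
instance (s : String) (out : Int) : Decidable (Spec_solution s out) := by unfold Spec_solution; infer_instance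

-- ===== CLAIM (what is proved, stated in full; the proofs are below) =====
def Claim_equal_solution : Prop := ∀ (s : String), Dom_solution s → Spec_solution s (solution s)

-- ===== LEMMAS AND PROOFS =====

-- number of decimal digits (= iterations of A's digit loop) of a positive number
def pvDigLen (m : Nat) : Nat :=
  if m < 10 then 1 else pvDigLen (m / 10) + 1
termination_by m
decreasing_by exact Nat.div_lt_self (by omega) (by norm_num)

-- the chunk s[p:p+u]
def pvChunk (cs : List Char) (u p : Int) : List Char :=
  PySem.List.slice cs (some p) (some (p + u))

-- the list of chunks starting at p
def pvChunks (cs : List Char) (u p : Int) : List (List Char) :=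
  (PySem.List.pyRange p (cs.length : Int) u).map (pvChunk cs u)

-- semantic run-length length of a chunk list, given the current run key c of count k
def pvRle (c : List Char) (k : Int) : List (List Char) → Int
  | [] => c.length + (if 1 < k then ((PySem.Int.toChars k).length : Int) else 0)
  | d :: rest =>
    if d = c then pvRle c (k + 1) rest
    else c.length + (if 1 < k then ((PySem.Int.toChars k).length : Int) else 0) + pvRle d 1 rest

theorem pvRange_cons_of_pos (a b u : Int) (hu : 0 < u) (hab : a < b) :
    PySem.List.pyRange a b u = a :: PySem.List.pyRange (a + u) b u := by
  rw [PySem.List.pyRange_of_pos a b hu, PySem.List.pyRange_of_pos (a+u) b hu]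
  by_cases h2 : a + u < b
  · rw [if_pos hab, if_pos h2]
    have key : ((b - a + u - 1) / u).toNat = ((b - (a+u) + u - 1) / u).toNat + 1 := by
      have he : b - a + u - 1 = (b - (a+u) + u - 1) + 1 * u := by ring
      rw [he, Int.add_mul_ediv_right _ _ (by omega : u ≠ 0)]
      have h0 : 0 ≤ (b - (a+u) + u - 1) / u := Int.ediv_nonneg (by omega) (by omega)
      omega
    rw [key, List.range_succ_eq_map]
    simp only [List.map_cons, List.map_map, Nat.cast_zero, mul_zero, add_zero]
    congr 1
    apply List.map_congr_left
    intro k _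
    simp [Function.comp]
    ring
  · rw [if_pos hab, if_neg h2]
    have key : ((b - a + u - 1) / u).toNat = 1 := by
      have h1 : 1 * u ≤ b - a + u - 1 := by omega
      have hlt : b - a + u - 1 < 2 * u := by omega
      have hk1 : 1 ≤ (b - a + u - 1) / u := Int.le_ediv_iff_mul_le hu |>.mpr h1
      have hk2 : (b - a + u - 1) / u < 2 := Int.ediv_lt_iff_lt_mul hu |>.mpr hlt
      omega
    rw [key]
    simp

theorem pvRange_nil_of_le (a b u : Int) (hu : 0 < u) (hba : b ≤ a) :
    PySem.List.pyRange a b u = [] := by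
  rw [PySem.List.pyRange_of_pos a b hu]
  simp [show ¬ a < b by omega]

theorem pvToDigitsCore_len (f : Nat) :
    ∀ (m : Nat) (l : List Char), m < f →
      (Nat.toDigitsCore 10 f m l).length = pvDigLen m + l.length := by
  induction f with
  | zero => intro m l h; omega
  | succ f ih =>
    intro m l h
    rw [Nat.toDigitsCore]
    by_cases h10 : m < 10
    · have h0 : m / 10 = 0 := by omega
      rw [pvDigLen, if_pos h10]
      simp [h0]
      omega
    · have hne : ¬ m / 10 = 0 := by omega
      simp only [hne, ite_false]
      rw [ih (m / 10) _ (by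
        have := Nat.div_lt_self (show 0 < m by omega) (show 1 < 10 by norm_num); omega)]
      conv_rhs => rw [pvDigLen]
      rw [if_neg h10]
      simp
      omega

theorem pvDigitLoop_eq (k cl : Int) (hk : 1 ≤ k) :
    pvDigitLoop k cl = cl + (pvDigLen k.toNat : Int) := by
  generalize hm : k.toNat = m
  induction m using Nat.strong_induction_on generalizing k cl with
  | _ m ih =>
    rw [pvDigitLoop, if_pos (by omega)]
    have hfd : PySem.Int.floordiv k 10 = ((m / 10 : Nat) : Int) := by
      rw [show k = ((m : Nat) : Int) by omega]
      exact_mod_cast PySem.Int.floordiv_natCast m 10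
    rw [hfd]
    by_cases h10 : m < 10
    · rw [pvDigitLoop, if_neg (by omega), pvDigLen, if_pos h10]
      have : m / 10 = 0 := by omega
      omega
    · have hk' : ((m / 10 : Nat) : Int).toNat = m / 10 := Int.toNat_natCast _
      rw [ih (m / 10) (Nat.div_lt_self (by omega) (by norm_num)) _ _
        (by push_cast; omega) hk']
      conv_rhs => rw [pvDigLen]
      rw [if_neg h10]
      push_cast
      ring

theorem pvToCharsLen (k : Int) (hk : 1 ≤ k) :
    (PySem.Int.toChars k).length = pvDigLen k.toNat := by
  rw [PySem.Int.toChars]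
  rw [if_neg (by omega)]
  rw [Nat.toDigits]
  rw [pvToDigitsCore_len (k.toNat + 1) k.toNat [] (by omega)]
  simp

theorem pvDigLen_le (m : Nat) (hm : 2 ≤ m) : pvDigLen m ≤ m - 1 := by
  induction m using Nat.strong_induction_on with
  | _ m ih =>
    rw [pvDigLen]
    by_cases h10 : m < 10
    · rw [if_pos h10]; omega
    · rw [if_neg h10]
      by_cases hq : m / 10 < 2
      · rw [pvDigLen, if_pos (by omega)]
        omega
      · have := ih (m / 10) (Nat.div_lt_self (by omega) (by norm_num)) (by omega)
        omega

theorem pvChunk_len (cs : List Char) (u p : Int) (hu : 1 ≤ u) (hp : 0 ≤ p)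
    (hpn : p ≤ (cs.length : Int)) :
    ((pvChunk cs u p).length : Int) = min u ((cs.length : Int) - p) := by
  rw [pvChunk, PySem.List.slice_toNat cs hp (by omega)]
  simp [List.length_take, List.length_drop]
  omega

theorem pvChunks_nil (cs : List Char) (u p : Int) (hu : 0 < u) (h : (cs.length : Int) ≤ p) :
    pvChunks cs u p = [] := by
  rw [pvChunks, pvRange_nil_of_le p _ u hu h]
  rfl

theorem pvChunks_cons (cs : List Char) (u p : Int) (hu : 0 < u) (h : p < (cs.length : Int)) :
    pvChunks cs u p = pvChunk cs u p :: pvChunks cs u (p + u) := by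
  rw [pvChunks, pvRange_cons_of_pos p _ u hu h, List.map_cons, pvChunks]

-- the digit-count term of a group never exceeds (count-1) * (key length)
theorem pvDcost_le (k L : Int) (hk : 1 ≤ k) (hL : 1 ≤ L) :
    (if 1 < k then ((PySem.Int.toChars k).length : Int) else 0) ≤ (k - 1) * L := by
  by_cases h : 1 < k
  · rw [if_pos h, pvToCharsLen k (by omega)]
    have h1 := pvDigLen_le k.toNat (by omega)
    have h2 : ((pvDigLen k.toNat : Nat) : Int) ≤ k - 1 := by omega
    have h3 : (k - 1) * 1 ≤ (k - 1) * L :=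
      mul_le_mul_of_nonneg_left hL (by omega)
    omega
  · rw [if_neg h]
    exact mul_nonneg (by omega) (by omega)

theorem pvRle_le (cs : List Char) (u : Int) (hu : 1 ≤ u) :
    ∀ (p k : Int) (key : List Char), 0 ≤ p → p ≤ (cs.length : Int) →
      1 ≤ (key.length : Int) → (key.length : Int) ≤ u → 1 ≤ k →
      pvRle key k (pvChunks cs u p) ≤ k * key.length + ((cs.length : Int) - p) := by
  suffices h : ∀ (fuel : Nat) (p k : Int) (key : List Char),
      ((cs.length : Int) - p).toNat < fuel → 0 ≤ p → p ≤ (cs.length : Int) →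
      1 ≤ (key.length : Int) → (key.length : Int) ≤ u → 1 ≤ k →
      pvRle key k (pvChunks cs u p) ≤ k * key.length + ((cs.length : Int) - p) by
    intro p k key h1 h2 h3 h4 h5
    exact h (((cs.length : Int) - p).toNat + 1) p k key (by omega) h1 h2 h3 h4 h5
  intro fuel
  induction fuel with
  | zero => intro p k key h; omega
  | succ fuel ih =>
    intro p k key hf h0 h1 hk1 hku hk
    by_cases hpn : (cs.length : Int) ≤ p
    · rw [pvChunks_nil cs u p (by omega) hpn, pvRle]
      have hd := pvDcost_le k (key.length : Int) hk hk1
      have : (k - 1) * (key.length : Int) = k * key.length - key.length := by ring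
      omega
    · rw [pvChunks_cons cs u p (by omega) (by omega), pvRle]
      have hlen : ((pvChunk cs u p).length : Int) = min u ((cs.length : Int) - p) :=
        pvChunk_len cs u p hu h0 h1
      by_cases hdup : pvChunk cs u p = key
      · rw [if_pos hdup]
        have hkey : (key.length : Int) = min u ((cs.length : Int) - p) := by
          rw [← hdup]; exact hlen
        by_cases hin : p + u ≤ (cs.length : Int)
        · have := ih (p + u) (k + 1) key (by omega) (by omega) (by omega) hk1 hku (by omega)
          have hexp : (k + 1) * (key.length : Int) = k * key.length + key.length := by ring
          omega
        · rw [pvChunks_nil cs u (p + u) (by omega) (by omega), pvRle]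
          have hd := pvDcost_le (k + 1) (key.length : Int) (by omega) hk1
          have hexp : (k + 1 - 1) * (key.length : Int) = k * key.length := by ring
          omega
      · rw [if_neg hdup]
        have hd := pvDcost_le k (key.length : Int) hk hk1
        have hexp : (k - 1) * (key.length : Int) = k * key.length - key.length := by ring
        by_cases hin : p + u ≤ (cs.length : Int)
        · have := ih (p + u) 1 (pvChunk cs u p) (by omega) (by omega) (by omega)
            (by omega) (by omega) (by omega)
          omega
        · rw [pvChunks_nil cs u (p + u) (by omega) (by omega), pvRle]
          rw [if_neg (by omega : ¬ (1:Int) < 1)]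
          omega

theorem pvGet_some (cs : List Char) (i : Int) (h0 : 0 ≤ i) :
    PySem.List.pyGet? cs i = cs[i.toNat]? := by
  rw [show i = ((i.toNat : Nat) : Int) by omega, PySem.List.pyGet?_natCast,
    Int.toNat_natCast]

theorem pvSlice_empty (cs : List Char) (x : Int) (hx : 0 ≤ x) :
    PySem.List.slice cs (some x) (some x) = [] := by
  rw [PySem.List.slice_toNat cs hx hx]
  simp

theorem pvSlice_cons (cs : List Char) (a b : Int) (ha : 0 ≤ a) (hab : a < b)
    (h : a.toNat < cs.length) :
    PySem.List.slice cs (some a) (some b) =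
      cs[a.toNat] :: PySem.List.slice cs (some (a + 1)) (some b) := by
  rw [PySem.List.slice_toNat cs ha (by omega), PySem.List.slice_toNat cs (by omega) (by omega)]
  rw [show (a + 1).toNat = a.toNat + 1 by omega]
  rw [List.drop_eq_getElem_cons h]
  rw [show b.toNat - a.toNat = (b.toNat - (a.toNat + 1)) + 1 by omega]
  rw [List.take_succ_cons]

theorem pvCheck_full_aux (cs : List Char) (u b s : Int) (hu : 1 ≤ u) (hb : 0 ≤ b)
    (hbn : b + u ≤ (cs.length : Int)) (hs : 0 ≤ s) (hsn : s + u ≤ (cs.length : Int)) :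
    ∀ (fuel : Nat) (j : Int), (u - j).toNat < fuel → 0 ≤ j → j ≤ u →
      pvCheck cs (cs.length : Int) b s (PySem.List.pyRange j u 1) =
        (if PySem.List.slice cs (some (s + j)) (some (s + u)) =
            PySem.List.slice cs (some (b + j)) (some (b + u)) then (true, b) else (false, s)) := by
  intro fuel
  induction fuel with
  | zero => intro j h; omega
  | succ fuel ih =>
    intro j hf h0 h1
    by_cases hj : j < u
    · rw [PySem.List.pyRange_one_cons hj]
      simp only [pvCheck]
      rw [show j + s = s + j by ring]
      rw [if_neg (by omega)]
      have hgb : PySem.List.pyGet? cs (b + j) = some (cs[(b + j).toNat]'(by omega)) := by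
        rw [pvGet_some cs (b + j) (by omega)]
        exact List.getElem?_eq_getElem (by omega)
      have hgs : PySem.List.pyGet? cs (s + j) = some (cs[(s + j).toNat]'(by omega)) := by
        rw [pvGet_some cs (s + j) (by omega)]
        exact List.getElem?_eq_getElem (by omega)
      have hsb := pvSlice_cons cs (b + j) (b + u) (by omega) (by omega) (by omega)
      have hss := pvSlice_cons cs (s + j) (s + u) (by omega) (by omega) (by omega)
      rw [hsb, hss]
      by_cases hch : cs[(b + j).toNat]'(by omega) = cs[(s + j).toNat]'(by omega)
      · rw [if_neg (by simp [hgb, hgs, hch])]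
        rw [show b + j + 1 = b + (j + 1) by ring, show s + j + 1 = s + (j + 1) by ring]
        rw [ih (j + 1) (by omega) (by omega) (by omega)]
        by_cases ht : PySem.List.slice cs (some (s + (j + 1))) (some (s + u)) =
            PySem.List.slice cs (some (b + (j + 1))) (some (b + u))
        · rw [if_pos ht, if_pos (by simp [ht, hch])]
        · rw [if_neg ht, if_neg (by intro hcc; injection hcc with _ h2; exact ht h2)]
      · rw [if_pos (by simp [hgb, hgs]; exact fun hcc => hch hcc)]
        rw [if_neg (by intro hcc; injection hcc with hh _; exact hch hh.symm)]
    · have hju : j = u := by omega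
      rw [hju]
      rw [PySem.List.pyRange_one_eq_nil (le_refl u)]
      simp only [pvCheck]
      rw [if_pos (by rw [pvSlice_empty cs (s + u) (by omega), pvSlice_empty cs (b + u) (by omega)])]

theorem pvCheck_partial_aux (cs : List Char) (u b s : Int)
    (hsn : (cs.length : Int) < s + u) :
    ∀ (fuel : Nat) (j : Int), (u - j).toNat < fuel → 0 ≤ j → j < u →
      (pvCheck cs (cs.length : Int) b s (PySem.List.pyRange j u 1)).1 = false := by
  intro fuel
  induction fuel with
  | zero => intro j h; omega
  | succ fuel ih =>
    intro j hf h0 h1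
    rw [PySem.List.pyRange_one_cons h1]
    simp only [pvCheck]
    by_cases hend : (cs.length : Int) ≤ j + s
    · rw [if_pos hend]
    · rw [if_neg hend]
      by_cases hne : PySem.List.pyGet? cs (b + j) ≠ PySem.List.pyGet? cs (j + s)
      · rw [if_pos hne]
      · rw [if_neg hne]
        exact ih (j + 1) (by omega) (by omega) (by omega)

theorem pvCheck_full (cs : List Char) (u b s : Int) (hu : 1 ≤ u) (hb : 0 ≤ b)
    (hbn : b + u ≤ (cs.length : Int)) (hs : 0 ≤ s) (hsn : s + u ≤ (cs.length : Int)) :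
    pvCheck cs (cs.length : Int) b s (PySem.List.pyRange 0 u 1) =
      (if pvChunk cs u s = pvChunk cs u b then (true, b) else (false, s)) := by
  have h := pvCheck_full_aux cs u b s hu hb hbn hs hsn (u.toNat + 1) 0 (by omega) (by omega)
    (by omega)
  rw [show s + (0:Int) = s by ring, show b + (0:Int) = b by ring] at h
  exact h

theorem pvCheck_partial (cs : List Char) (u b s : Int) (hu : 1 ≤ u)
    (hsn : (cs.length : Int) < s + u) :
    (pvCheck cs (cs.length : Int) b s (PySem.List.pyRange 0 u 1)).1 = false := by
  have h := pvCheck_partial_aux cs u b s hsn (u.toNat + 1) 0 (by omega) (by omega) (by omega)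
  exact h

theorem pvB_loop (cs : List Char) (u : Int) (hu : 1 ≤ u) :
    ∀ (p k t : Int) (key : List Char), 0 ≤ p →
      pvBFinish ((PySem.List.pyRange p (cs.length : Int) u).foldl (pvBStep cs u) (some key, k, t)) =
        t + pvRle key k (pvChunks cs u p) := by
  suffices h : ∀ (fuel : Nat) (p k t : Int) (key : List Char),
      ((cs.length : Int) - p).toNat < fuel → 0 ≤ p →
      pvBFinish ((PySem.List.pyRange p (cs.length : Int) u).foldl (pvBStep cs u) (some key, k, t)) =
        t + pvRle key k (pvChunks cs u p) by
    intro p k t key h0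
    exact h (((cs.length : Int) - p).toNat + 1) p k t key (by omega) h0
  intro fuel
  induction fuel with
  | zero => intro p k t key h; omega
  | succ fuel ih =>
    intro p k t key hf h0
    by_cases hpn : (cs.length : Int) ≤ p
    · rw [pvRange_nil_of_le p _ u (by omega) hpn, pvChunks_nil cs u p (by omega) hpn]
      rw [List.foldl_nil, pvRle, pvBFinish, pvGroupLen]
      push_cast
      ring
    · rw [pvRange_cons_of_pos p _ u (by omega) (by omega),
        pvChunks_cons cs u p (by omega) (by omega), List.foldl_cons]
      rw [pvRle]
      by_cases hdup : pvChunk cs u p = key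
      · have hstep : pvBStep cs u (some key, k, t) p = (some key, k + 1, t) := by
          rw [pvBStep]
          rw [if_pos (by rw [← hdup]; rfl)]
        rw [hstep, if_pos hdup]
        exact ih (p + u) (k + 1) t key (by omega) (by omega)
      · have hstep : pvBStep cs u (some key, k, t) p =
            (some (pvChunk cs u p), 1, t + pvGroupLen key k) := by
          rw [pvBStep]
          rw [if_neg (by simp [pvChunk] at hdup ⊢; exact hdup)]
          rfl
        rw [hstep, if_neg hdup]
        rw [ih (p + u) 1 (t + pvGroupLen key k) (pvChunk cs u p) (by omega) (by omega)]
        rw [pvGroupLen]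
        push_cast
        ring

-- current_length update at a flush
theorem pvCl2_eq (k cl1 : Int) (hk : 1 ≤ k) :
    (if 1 < k then pvDigitLoop k cl1 else cl1) =
      cl1 + (if 1 < k then ((PySem.Int.toChars k).length : Int) else 0) := by
  by_cases h : 1 < k
  · rw [if_pos h, if_pos h, pvDigitLoop_eq k cl1 (by omega), pvToCharsLen k (by omega)]
  · rw [if_neg h, if_neg h, add_zero]

theorem pvA_loop (cs : List Char) (u : Int) (hu : 1 ≤ u) :
    ∀ (fuel : Nat) (s b k cl a : Int), ((cs.length : Int) - s).toNat < fuel →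
      0 ≤ b → b + u ≤ (cs.length : Int) → 1 ≤ k → s = b + k * u → s ≤ (cs.length : Int) →
      ((PySem.List.pyRange s ((cs.length : Int) + u) u).foldl (pvAStep cs (cs.length : Int) u)
          (cl, b, k, a)).2.2.2 =
        min a (cl - ((cs.length : Int) - b) + pvRle (pvChunk cs u b) k (pvChunks cs u s)) := by
  intro fuel
  induction fuel with
  | zero => intro s b k cl a h; omega
  | succ fuel ih =>
    intro s b k cl a hf hb hbn hk hseq hsn
    have hn0 : (0:Int) ≤ (cs.length : Int) := by positivity
    have hku : 1 * u ≤ k * u := mul_le_mul_of_nonneg_right hk (by omega)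
    have hs0 : 0 ≤ s := by omega
    have hlb : ((pvChunk cs u b).length : Int) = u := by
      rw [pvChunk_len cs u b hu hb (by omega)]; omega
    rw [pvRange_cons_of_pos s _ u (by omega) (by omega), List.foldl_cons]
    by_cases hfull : s + u ≤ (cs.length : Int)
    · -- a full chunk is compared
      have hls : ((pvChunk cs u s).length : Int) = u := by
        rw [pvChunk_len cs u s hu hs0 (by omega)]; omega
      have hpr := pvCheck_full cs u b s hu hb hbn hs0 hfull
      rw [pvChunks_cons cs u s (by omega) (by omega), pvRle]
      by_cases hdup : pvChunk cs u s = pvChunk cs u b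
      · rw [if_pos hdup] at hpr
        have hstep : pvAStep cs (cs.length : Int) u (cl, b, k, a) s = (cl, b, k + 1, a) := by
          simp [pvAStep, hpr]
        rw [hstep, if_pos hdup]
        exact ih (s + u) b (k + 1) cl a (by omega) hb hbn (by omega) (by rw [hseq]; ring)
          (by omega)
      · rw [if_neg hdup] at hpr
        set dc := (if 1 < k then ((PySem.Int.toChars k).length : Int) else 0) with hdc
        have hstep : pvAStep cs (cs.length : Int) u (cl, b, k, a) s =
            (cl - (k - 1) * u + dc, s, 1, min a (cl - (k - 1) * u + dc)) := by
          simp only [pvAStep, hpr]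
          rw [if_neg (by simp)]
          rw [pvCl2_eq k (cl - (k - 1) * u) hk]
        rw [hstep, if_neg hdup]
        rw [ih (s + u) s 1 (cl - (k - 1) * u + dc) (min a (cl - (k - 1) * u + dc))
          (by omega) hs0 (by omega) (by omega) (by ring) (by omega)]
        have hGle : pvRle (pvChunk cs u s) 1 (pvChunks cs u (s + u)) ≤
            (cs.length : Int) - s := by
          have := pvRle_le cs u hu (s + u) 1 (pvChunk cs u s) (by omega) (by omega)
            (by omega) (by omega) (by omega)
          omega
        have hXeq : cl - (k - 1) * u + dc - ((cs.length : Int) - s) +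
              pvRle (pvChunk cs u s) 1 (pvChunks cs u (s + u)) =
            cl - ((cs.length : Int) - b) + ((pvChunk cs u b).length + dc +
              pvRle (pvChunk cs u s) 1 (pvChunks cs u (s + u))) := by
          rw [hlb, hseq]; ring
        have hle : cl - ((cs.length : Int) - b) + ((pvChunk cs u b).length + dc +
              pvRle (pvChunk cs u s) 1 (pvChunks cs u (s + u))) ≤
            cl - (k - 1) * u + dc := by
          rw [← hXeq]; omega
        rw [hXeq, min_assoc, min_eq_right hle]
    · -- the chunk starting at s is partial (or empty): the comparison always fails
      have hpr := pvCheck_partial cs u b s hu (by omega)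
      rcases hpc : pvCheck cs (cs.length : Int) b s (PySem.List.pyRange 0 u 1) with ⟨isDup, b1⟩
      rw [hpc] at hpr
      simp only at hpr
      set dc := (if 1 < k then ((PySem.Int.toChars k).length : Int) else 0) with hdc
      have hstep : pvAStep cs (cs.length : Int) u (cl, b, k, a) s =
          (cl - (k - 1) * u + dc, b1, 1, min a (cl - (k - 1) * u + dc)) := by
        simp only [pvAStep, hpc, hpr]
        rw [if_neg (by simp)]
        rw [pvCl2_eq k (cl - (k - 1) * u) hk]
      rw [hstep]
      by_cases hsn2 : s < (cs.length : Int)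
      · -- partial final chunk: one more (vacuous) step follows
        rw [pvRange_cons_of_pos (s + u) _ u (by omega) (by omega), List.foldl_cons]
        have hpr2 := pvCheck_partial cs u b1 (s + u) hu (by omega)
        rcases hpc2 : pvCheck cs (cs.length : Int) b1 (s + u) (PySem.List.pyRange 0 u 1) with
          ⟨isDup2, b2⟩
        rw [hpc2] at hpr2
        simp only at hpr2
        have hstep2 : pvAStep cs (cs.length : Int) u
            (cl - (k - 1) * u + dc, b1, 1, min a (cl - (k - 1) * u + dc)) (s + u) =
            (cl - (k - 1) * u + dc, b2, 1,
              min (min a (cl - (k - 1) * u + dc)) (cl - (k - 1) * u + dc)) := by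
          simp only [pvAStep, hpc2, hpr2]
          rw [if_neg (by simp)]
          rw [if_neg (by omega : ¬ (1:Int) < 1)]
          norm_num
        rw [hstep2, pvRange_nil_of_le (s + u + u) _ u (by omega) (by omega), List.foldl_nil]
        rw [pvChunks_cons cs u s (by omega) (by omega),
          pvChunks_nil cs u (s + u) (by omega) (by omega), pvRle]
        have hls : ((pvChunk cs u s).length : Int) = (cs.length : Int) - s := by
          rw [pvChunk_len cs u s hu hs0 (by omega)]; omega
        rw [if_neg (by intro hcc; have := congrArg List.length hcc; omega)]
        rw [pvRle]
        rw [if_neg (by omega : ¬ (1:Int) < 1)]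
        have hXeq : cl - ((cs.length : Int) - b) +
            ((pvChunk cs u b).length + dc + (((pvChunk cs u s).length : Int) + 0)) =
            cl - (k - 1) * u + dc := by
          rw [hlb, hls, hseq]; ring
        rw [hXeq, min_assoc, min_self]
      · -- s = n: the loop ends right after this step
        have hsn3 : s = (cs.length : Int) := by omega
        rw [pvRange_nil_of_le (s + u) _ u (by omega) (by omega), List.foldl_nil]
        rw [pvChunks_nil cs u s (by omega) (by omega), pvRle]
        have hXeq : cl - ((cs.length : Int) - b) + (((pvChunk cs u b).length : Int) + dc) =
            cl - (k - 1) * u + dc := by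
          rw [hlb]
          have : (cs.length : Int) = b + k * u := by omega
          rw [this]; ring
        rw [hXeq]
  

theorem pvUnit_eq (cs : List Char) (u ans : Int) (hu : 1 ≤ u)
    (h2u : 2 * u ≤ (cs.length : Int)) :
    ((PySem.List.pyRange u ((cs.length : Int) + u) u).foldl (pvAStep cs (cs.length : Int) u)
        ((cs.length : Int), 0, 1, ans)).2.2.2 =
      min ans (pvBFinish ((PySem.List.pyRange 0 (cs.length : Int) u).foldl (pvBStep cs u)
        (none, 0, 0))) := by
  have hun : u ≤ (cs.length : Int) := by omega
  rw [pvA_loop cs u hu (((cs.length : Int) - u).toNat + 1) u 0 1 (cs.length : Int) ans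
    (by omega) (by omega) (by omega) (by omega) (by ring) hun]
  rw [pvRange_cons_of_pos 0 _ u (by omega) (by omega), List.foldl_cons]
  have hfirst : pvBStep cs u (none, 0, 0) 0 = (some (pvChunk cs u 0), 1, 0) := by
    rw [pvBStep]
    rw [if_neg (by simp)]
    rfl
  rw [hfirst, show (0 : Int) + u = u by ring]
  rw [pvB_loop cs u hu u 1 0 (pvChunk cs u 0) (by omega)]
  congr 1
  omega

-- ===== VERDICT (by name: the statement is the Claim_ definition above) =====
theorem solution_spec : Claim_equal_solution := by
  intro s _
  unfold Spec_solution solution solution_alt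
  apply PySem.List.foldl_congr_mem
  intro acc u hu
  rw [PySem.List.mem_pyRange_one] at hu
  obtain ⟨h1, h2⟩ := hu
  have hfd : PySem.Int.floordiv (s.toList.length : Int) 2 = (s.toList.length : Int) / 2 :=
    PySem.Int.floordiv_eq_ediv_of_pos (by norm_num)
  have hmod := Int.mul_ediv_add_emod (s.toList.length : Int) 2
  have hmn : 0 ≤ (s.toList.length : Int) % 2 := Int.emod_nonneg _ (by norm_num)
  have h2u : 2 * u ≤ (s.toList.length : Int) := by omega
  exact pvUnit_eq s.toList u acc h1 h2u
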